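-- pv_equiv track=rewrite | github.com/kelmegan/maizemind-juncture | scripts/scoring_compare.py | claim_connected_to_thesis_legacy
-- ===== SOURCE A (Python) =====
-- from typing import Any
--
-- def claim_connected_to_thesis_legacy(nodes: list[dict[str, Any]], edges: list[dict[str, Any]], claim_id: str, thesis_ids: list[str]) -> bool:
--     if claim_id in thesis_ids or not thesis_ids:
--         return True
--     visited = {claim_id}
--     queue = [claim_id]
--     idx = 0
--     while idx < len(queue):
--         cur = queue[idx]
--         if cur in thesis_ids:
--             return True
--         for edge in edges:
--             et = edge.get("type", "")
--             if et not in ["SUPPORTS", "ADDRESSES", "CONTRADICTS"]: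
--                 continue
--             nxt = ""
--             if edge.get("source", "") == cur:
--                 nxt = str(edge.get("target", ""))
--             elif edge.get("target", "") == cur:
--                 nxt = str(edge.get("source", ""))
--             if nxt and nxt not in visited:
--                 visited.add(nxt)
--                 queue.append(nxt)
--         idx += 1
--     return False
-- ===== SOURCE B (Python) =====
-- def claim_connected_to_thesis_legacy(nodes: list, edges: list, claim_id: str, thesis_ids: list) -> bool:
--     thesis = set(thesis_ids)
--     if claim_id in thesis or not thesis:
--         return True
--     # Build the adjacency list once: O(V+E) instead of rescanning all edges per visited node.
--     adj = {}
--     for edge in edges: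
--         if edge.get("type", "") not in ("SUPPORTS", "ADDRESSES", "CONTRADICTS"):
--             continue
--         s = str(edge.get("source", ""))
--         t = str(edge.get("target", ""))
--         if t:
--             adj.setdefault(s, []).append(t)
--         if s and s != t:
--             adj.setdefault(t, []).append(s)
--     visited = {claim_id}
--     queue = [claim_id]
--     idx = 0
--     while idx < len(queue):
--         cur = queue[idx]
--         if cur in thesis:
--             return True
--         for nxt in adj.get(cur, ()):
--             if nxt not in visited:
--                 visited.add(nxt)
--                 queue.append(nxt)
--         idx += 1
--     return False
-- ===== Notes on version B (the rewrite author's own statement) =====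
-- stated objective: alternative
-- what changed: B precomputes an adjacency list from the edges once and looks up each BFS node's neighbours in it (thesis_ids held as a set), instead of A's rescan of the whole edge list for every dequeued node.
import Mathlib
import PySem

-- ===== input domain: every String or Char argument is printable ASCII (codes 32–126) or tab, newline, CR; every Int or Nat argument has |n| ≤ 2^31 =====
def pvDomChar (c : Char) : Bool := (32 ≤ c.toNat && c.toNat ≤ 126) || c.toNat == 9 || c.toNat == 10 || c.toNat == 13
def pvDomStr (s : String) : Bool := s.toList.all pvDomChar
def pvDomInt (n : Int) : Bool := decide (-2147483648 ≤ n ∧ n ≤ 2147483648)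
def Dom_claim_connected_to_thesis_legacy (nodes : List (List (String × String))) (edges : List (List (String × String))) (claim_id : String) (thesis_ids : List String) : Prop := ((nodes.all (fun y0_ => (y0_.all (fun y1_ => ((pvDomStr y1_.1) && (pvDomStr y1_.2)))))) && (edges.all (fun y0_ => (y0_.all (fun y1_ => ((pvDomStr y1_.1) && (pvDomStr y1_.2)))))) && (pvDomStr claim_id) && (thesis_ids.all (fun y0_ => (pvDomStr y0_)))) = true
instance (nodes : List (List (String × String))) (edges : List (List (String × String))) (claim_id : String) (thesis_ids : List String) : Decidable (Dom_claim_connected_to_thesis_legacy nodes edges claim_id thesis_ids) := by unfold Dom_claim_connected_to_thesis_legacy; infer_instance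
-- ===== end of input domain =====

-- B replaces A's per-node rescan of the whole edge list by an adjacency list built once (thesis_ids as a set); same BFS order, same return value.


-- ===== PORT A =====
-- A's inner `for edge in edges` loop body: state = (visited, queue-tail-after-cur).
def pvStepA (cur : String) (st : PySem.Set String × List String) (edge : List (String × String)) :
    PySem.Set String × List String :=
  let e := PySem.Dict.ofList edge
  let et := e.getD "type" ""
  if et = "SUPPORTS" ∨ et = "ADDRESSES" ∨ et = "CONTRADICTS" then
    let nxt : String :=
      if e.getD "source" "" = cur then e.getD "target" ""
      else if e.getD "target" "" = cur then e.getD "source" ""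
      else ""
    if nxt ≠ "" ∧ nxt ∉ st.1 then (PySem.Set.add st.1 nxt, st.2 ++ [nxt]) else st
  else st

-- A's `while idx < len(queue)` loop; `pending` is queue[idx:].  The fuel only makes the
-- recursion total: 2*|edges|+1 bounds the number of dequeues (each enqueued node is fresh
-- in `visited` and is claim_id or an endpoint of some edge), so it never runs out.
def pvBfsA (edges : List (List (String × String))) (thesis_ids : List String) :
    Nat → PySem.Set String → List String → Bool
  | 0, _, _ => false
  | fuel+1, visited, pending =>
    match pending with
    | [] => false
    | cur :: rest =>
      if cur ∈ thesis_ids then true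
      else
        let st := edges.foldl (pvStepA cur) (visited, rest)
        pvBfsA edges thesis_ids fuel st.1 st.2

def claim_connected_to_thesis_legacy (nodes : List (List (String × String))) (edges : List (List (String × String))) (claim_id : String) (thesis_ids : List String) : Bool :=
  if claim_id ∈ thesis_ids ∨ thesis_ids = [] then true
  else pvBfsA edges thesis_ids (2 * edges.length + 1) (PySem.Set.add PySem.Set.empty claim_id) [claim_id]

-- ===== PORT B =====
-- B builds the adjacency dict once (per edge: t into adj[s] when t nonempty, s into adj[t]
-- when s nonempty and s ≠ t), then the BFS looks neighbours up instead of rescanning edges.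
def pvAdjStep (adj : PySem.Dict String (List String)) (edge : List (String × String)) :
    PySem.Dict String (List String) :=
  let e := PySem.Dict.ofList edge
  let et := e.getD "type" ""
  if et == "SUPPORTS" || et == "ADDRESSES" || et == "CONTRADICTS" then
    let s := e.getD "source" ""
    let t := e.getD "target" ""
    let adj1 := if t ≠ "" then adj.modify s [] (· ++ [t]) else adj
    if s ≠ "" ∧ s ≠ t then adj1.modify t [] (· ++ [s]) else adj1
  else adj

def pvAdj (edges : List (List (String × String))) : PySem.Dict String (List String) :=
  edges.foldl pvAdjStep PySem.Dict.empty

def pvStepB (st : PySem.Set String × List String) (nxt : String) :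
    PySem.Set String × List String :=
  if nxt ∉ st.1 then (PySem.Set.add st.1 nxt, st.2 ++ [nxt]) else st

def pvBfsB (adj : PySem.Dict String (List String)) (thesis : PySem.Set String) :
    Nat → PySem.Set String → List String → Bool
  | 0, _, _ => false
  | fuel+1, visited, pending =>
    match pending with
    | [] => false
    | cur :: rest =>
      if PySem.Set.contains thesis cur then true
      else
        let st := (adj.getD cur []).foldl pvStepB (visited, rest)
        pvBfsB adj thesis fuel st.1 st.2

def claim_connected_to_thesis_legacy_alt (nodes : List (List (String × String))) (edges : List (List (String × String))) (claim_id : String) (thesis_ids : List String) : Bool :=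
  let thesis : PySem.Set String := PySem.Set.ofList thesis_ids
  if PySem.Set.contains thesis claim_id ∨ thesis = [] then true
  else pvBfsB (pvAdj edges) thesis (2 * edges.length + 1) (PySem.Set.add PySem.Set.empty claim_id) [claim_id]

-- ===== PRECONDITION & SPEC =====
def Spec_claim_connected_to_thesis_legacy (nodes : List (List (String × String))) (edges : List (List (String × String))) (claim_id : String) (thesis_ids : List String) (out : Bool) : Prop := out = claim_connected_to_thesis_legacy_alt nodes edges claim_id thesis_ids
instance (nodes : List (List (String × String))) (edges : List (List (String × String))) (claim_id : String) (thesis_ids : List String) (out : Bool) : Decidable (Spec_claim_connected_to_thesis_legacy nodes edges claim_id thesis_ids out) := by unfold Spec_claim_connected_to_thesis_legacy; infer_instance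

-- ===== CLAIM (what is proved, stated in full; the proofs are below) =====
def Claim_equal_claim_connected_to_thesis_legacy : Prop := ∀ (nodes : List (List (String × String))) (edges : List (List (String × String))) (claim_id : String) (thesis_ids : List String), Dom_claim_connected_to_thesis_legacy nodes edges claim_id thesis_ids → Spec_claim_connected_to_thesis_legacy nodes edges claim_id thesis_ids (claim_connected_to_thesis_legacy nodes edges claim_id thesis_ids)

-- ===== LEMMAS AND PROOFS =====

-- the single neighbour (if any) A's edge scan yields for `cur` from one edge
def pvCand (cur : String) (edge : List (String × String)) : Option String :=
  let e := PySem.Dict.ofList edge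
  let et := e.getD "type" ""
  if et = "SUPPORTS" ∨ et = "ADDRESSES" ∨ et = "CONTRADICTS" then
    let s := e.getD "source" ""
    let t := e.getD "target" ""
    if s = cur then (if t ≠ "" then some t else none)
    else if t = cur then (if s ≠ "" then some s else none)
    else none
  else none

theorem pvStepA_eq_cand (cur : String) (st : PySem.Set String × List String)
    (edge : List (String × String)) :
    pvStepA cur st edge = (pvCand cur edge).elim st (pvStepB st) := by
  simp only [pvStepA, pvCand]
  split_ifs <;> simp_all [pvStepB]

theorem pvFoldA_eq (cur : String) (edges : List (List (String × String)))
    (st : PySem.Set String × List String) :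
    edges.foldl (pvStepA cur) st = (edges.filterMap (pvCand cur)).foldl pvStepB st := by
  induction edges generalizing st with
  | nil => rfl
  | cons e es ih =>
    simp only [List.foldl_cons, List.filterMap_cons, pvStepA_eq_cand]
    cases h : pvCand cur e <;> simp [ih]

theorem pvAdjStep_getD (d : PySem.Dict String (List String)) (edge : List (String × String))
    (cur : String) :
    (pvAdjStep d edge).getD cur [] = d.getD cur [] ++ (pvCand cur edge).toList := by
  simp only [pvAdjStep, pvCand]
  split_ifs <;> simp_all [PySem.Dict.getD_modify] <;> (try split_ifs) <;> (try simp_all) <;> tauto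

theorem pvAdj_getD (edges : List (List (String × String))) (cur : String)
    (d : PySem.Dict String (List String)) :
    (edges.foldl pvAdjStep d).getD cur [] = d.getD cur [] ++ edges.filterMap (pvCand cur) := by
  induction edges generalizing d with
  | nil => simp
  | cons e es ih =>
    simp only [List.foldl_cons, List.filterMap_cons, ih, pvAdjStep_getD]
    cases h : pvCand cur e <;> simp

theorem pvAdj_spec (edges : List (List (String × String))) (cur : String) :
    (pvAdj edges).getD cur [] = edges.filterMap (pvCand cur) := by
  unfold pvAdj
  rw [pvAdj_getD]
  simp

theorem pvBfs_eq (edges : List (List (String × String))) (thesis_ids : List String)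
    (fuel : Nat) (visited : PySem.Set String) (pending : List String) :
    pvBfsA edges thesis_ids fuel visited pending
      = pvBfsB (pvAdj edges) (PySem.Set.ofList thesis_ids) fuel visited pending := by
  induction fuel generalizing visited pending with
  | zero => rfl
  | succ n ih =>
    cases pending with
    | nil => rfl
    | cons cur rest =>
      simp only [pvBfsA, pvBfsB, pvAdj_spec, pvFoldA_eq]
      have hmem : PySem.Set.contains (PySem.Set.ofList thesis_ids) cur = decide (cur ∈ thesis_ids) := by
        simp [PySem.Set.contains_eq_listContains, PySem.Set.mem_ofList]
      rw [hmem]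
      by_cases h : cur ∈ thesis_ids <;> simp [h, ih]

theorem ofList_nil_iff (xs : List String) : (PySem.Set.ofList xs = []) ↔ xs = [] := by
  cases xs with
  | nil => simp [PySem.Set.ofList_nil]
  | cons x xs => simp [PySem.Set.ofList_cons]

-- ===== VERDICT (by name: the statement is the Claim_ definition above) =====
theorem claim_connected_to_thesis_legacy_spec : Claim_equal_claim_connected_to_thesis_legacy := by
  intro nodes edges claim_id thesis_ids _
  unfold Spec_claim_connected_to_thesis_legacy
  unfold claim_connected_to_thesis_legacy claim_connected_to_thesis_legacy_alt
  have hmem : PySem.Set.contains (PySem.Set.ofList thesis_ids) claim_id = decide (claim_id ∈ thesis_ids) := by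
    simp [PySem.Set.contains_eq_listContains, PySem.Set.mem_ofList]
  simp only [hmem, ofList_nil_iff, pvBfs_eq]
  by_cases h : claim_id ∈ thesis_ids ∨ thesis_ids = [] <;> simp [h]
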